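-- pv_equiv track=rewrite | github.com/jwterbot2/SARS-CoV-2_InitialBaselineModel | PythonScripts/sc2-full2_stats-v0.2.py | getWindowsByVariants
-- ===== SOURCE A (Python) =====
-- def getWindowsByVariants(pos, winSize, stpSize, genSize):
-- 	winStarts = [];
-- 	winVarSizes = [];
-- 	curLoc = 1;
-- 	curEnd = curLoc + winSize;
-- 	while (curLoc < genSize):
-- 		curEnd = curLoc + winSize;
-- 		ctr = 0;
-- 		varStart = 0;
-- 		foundFirst = False;
-- 		for i in range(len(pos)):
-- 			if(pos[i]>=curLoc and pos[i] < curEnd):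
-- 				ctr +=1;
-- 				if(not foundFirst):
-- 					varStart = i;
-- 					foundFirst = True;
-- 		winStarts.append(varStart);
-- 		winVarSizes.append(ctr);
-- 		if((curLoc+winSize) > genSize):
-- 			curLoc = genSize;
-- 		else:
-- 			curLoc += stpSize;
-- 	return [winStarts, winVarSizes];
-- ===== SOURCE B (Python) =====
-- def getWindowsByVariants(pos, winSize, stpSize, genSize):
--     # Position-major sweep: map every position to its arithmetic range of
--     # covering windows and paint count/first-index arrays, instead of
--     # rescanning the whole position list for every window.
--     locs = []
--     cur = 1
--     while cur < genSize:
--         locs.append(cur)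
--         if cur + winSize > genSize:
--             break
--         cur += stpSize
--     w = len(locs)
--     counts = [0] * w
--     first = [0] * w
--     for i in reversed(range(len(pos))):
--         p = pos[i]
--         if stpSize > 0:
--             # window k (start 1 + k*stpSize) contains p  iff  klo <= k <= khi
--             klo = (p - 1 - winSize) // stpSize + 1
--             khi = (p - 1) // stpSize
--         elif 1 <= p < 1 + winSize:
--             klo, khi = 0, 0
--         else:
--             klo, khi = 0, -1
--         if klo < 0:
--             klo = 0
--         if khi > w - 1:
--             khi = w - 1
--         for k in range(klo, khi + 1):
--             counts[k] += 1
--             first[k] = i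
--     return [first, counts]
-- ===== Notes on version B (the rewrite author's own statement) =====
-- stated objective: alternative
-- what changed: Window-major rescans of the whole position list are replaced by a position-major sweep: each position's covering windows are obtained in closed form by floor division on the step, and count/first-index arrays are filled by painting that arithmetic range (descending index order makes the last write the first index).
import Mathlib
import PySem

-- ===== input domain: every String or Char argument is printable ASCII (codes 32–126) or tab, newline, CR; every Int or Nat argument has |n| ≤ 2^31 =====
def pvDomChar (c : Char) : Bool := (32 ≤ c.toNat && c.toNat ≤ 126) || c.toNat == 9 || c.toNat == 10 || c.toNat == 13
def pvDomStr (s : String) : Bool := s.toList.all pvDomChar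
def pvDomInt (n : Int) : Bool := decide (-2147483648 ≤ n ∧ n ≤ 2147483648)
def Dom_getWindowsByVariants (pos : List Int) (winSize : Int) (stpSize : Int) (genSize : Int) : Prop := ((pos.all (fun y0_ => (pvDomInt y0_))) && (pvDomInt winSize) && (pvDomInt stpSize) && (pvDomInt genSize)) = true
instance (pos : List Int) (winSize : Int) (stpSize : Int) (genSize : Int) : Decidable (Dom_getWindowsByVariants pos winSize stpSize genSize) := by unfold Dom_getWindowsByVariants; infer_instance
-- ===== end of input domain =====

-- B replaces A's per-window rescans of the whole position list by a single position-major
-- sweep (closed-form window range per position, painted into count/first arrays): alternative.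

-- ===== PORT A =====
-- inner 'for i in range(len(pos))' loop; pos[i] is in range for every visited i, so pyGetD is exact
def aInner (pos : List Int) (curLoc curEnd : Int) : Int × Int × Bool :=
  (PySem.List.pyRange 0 (pos.length : Int) 1).foldl
    (fun st i =>
      let p := PySem.List.pyGetD pos i 0
      if curLoc ≤ p ∧ p < curEnd then
        (st.1 + 1, if st.2.2 then st.2 else (i, true))
      else st)
    (0, 0, false)

-- the 'while curLoc < genSize' loop; when stpSize ≤ 0 and the loop would not end this
-- iteration, Python diverges (excluded by Pre_), so the port stops there (totality guard)
def aLoop (pos : List Int) (winSize stpSize genSize curLoc : Int)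
    (winStarts winVarSizes : List Int) : List Int × List Int :=
  if _h : curLoc < genSize then
    let r := aInner pos curLoc (curLoc + winSize)
    let ws := winStarts ++ [r.2.1]
    let vs := winVarSizes ++ [r.1]
    if curLoc + winSize > genSize then
      (ws, vs)  -- curLoc := genSize, then the while-condition fails
    else if _hs : stpSize ≤ 0 then
      (ws, vs)  -- totality guard: Python never terminates here (outside Pre_)
    else
      aLoop pos winSize stpSize genSize (curLoc + stpSize) ws vs
  else (winStarts, winVarSizes)
termination_by (genSize - curLoc).toNat
decreasing_by omega

def getWindowsByVariants (pos : List Int) (winSize : Int) (stpSize : Int) (genSize : Int) : List (List Int) :=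
  let r := aLoop pos winSize stpSize genSize 1 [] []
  [r.1, r.2]

-- ===== PORT B =====
-- Source B's first while loop, collecting the window start locations (same totality guard as A's loop)
def bLocs (winSize stpSize genSize cur : Int) (locs : List Int) : List Int :=
  if _h : cur < genSize then
    let locs' := locs ++ [cur]
    if cur + winSize > genSize then locs'   -- break
    else if _hs : stpSize ≤ 0 then locs'    -- totality guard: Python never terminates here (outside Pre_)
    else bLocs winSize stpSize genSize (cur + stpSize) locs'
  else locs
termination_by (genSize - cur).toNat
decreasing_by omega

-- the klo/khi computation of Source B (branches in source order, then the two clamps)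
def bRange (winSize stpSize w p : Int) : Int × Int :=
  let r :=
    if 0 < stpSize then
      (PySem.Int.floordiv (p - 1 - winSize) stpSize + 1, PySem.Int.floordiv (p - 1) stpSize)
    else if 1 ≤ p ∧ p < 1 + winSize then ((0 : Int), (0 : Int))
    else (0, -1)
  let kl := if r.1 < 0 then 0 else r.1
  let kh := if w - 1 < r.2 then w - 1 else r.2
  (kl, kh)

-- 'for k in range(klo, khi+1)': every visited k satisfies 0 ≤ k ≤ w-1, so pyGetD/pySetD are exact
def paint (i kl kh : Int) (st : List Int × List Int) : List Int × List Int :=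
  (PySem.List.pyRange kl (kh + 1) 1).foldl
    (fun st k =>
      (PySem.List.pySetD st.1 k (PySem.List.pyGetD st.1 k 0 + 1),
       PySem.List.pySetD st.2 k i))
    st

def bStep (pos : List Int) (winSize stpSize w : Int)
    (st : List Int × List Int) (j : Int) : List Int × List Int :=
  let p := PySem.List.pyGetD pos j 0
  let r := bRange winSize stpSize w p
  paint j r.1 r.2 st

def getWindowsByVariants_alt (pos : List Int) (winSize : Int) (stpSize : Int) (genSize : Int) : List (List Int) :=
  let locs := bLocs winSize stpSize genSize 1 []
  let w : Int := locs.length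
  let init := (List.replicate locs.length (0 : Int), List.replicate locs.length (0 : Int))
  let r := (PySem.List.pyRange 0 (pos.length : Int) 1).reverse.foldl
    (bStep pos winSize stpSize w) init
  [r.2, r.1]

-- ===== PRECONDITION & SPEC =====
-- Pre_ excludes exactly the inputs on which Python A's while loop never terminates
-- (a nonpositive step that never reaches the genome end); A returns on every other input.
def Pre_getWindowsByVariants (pos : List Int) (winSize : Int) (stpSize : Int) (genSize : Int) : Prop :=
  1 < genSize → (0 < stpSize ∨ genSize < 1 + winSize)
instance (pos : List Int) (winSize : Int) (stpSize : Int) (genSize : Int) : Decidable (Pre_getWindowsByVariants pos winSize stpSize genSize) := by unfold Pre_getWindowsByVariants; infer_instance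

def pvWitness_getWindowsByVariants : List Int × Int × Int × Int := ([2, 5, 7], 3, 2, 10)

def Spec_getWindowsByVariants (pos : List Int) (winSize : Int) (stpSize : Int) (genSize : Int) (out : List (List Int)) : Prop := out = getWindowsByVariants_alt pos winSize stpSize genSize
instance (pos : List Int) (winSize : Int) (stpSize : Int) (genSize : Int) (out : List (List Int)) : Decidable (Spec_getWindowsByVariants pos winSize stpSize genSize out) := by unfold Spec_getWindowsByVariants; infer_instance

-- ===== CLAIM (what is proved, stated in full; the proofs are below) =====
def Claim_equal_getWindowsByVariants : Prop := ∀ (pos : List Int) (winSize : Int) (stpSize : Int) (genSize : Int), Dom_getWindowsByVariants pos winSize stpSize genSize → Pre_getWindowsByVariants pos winSize stpSize genSize → Spec_getWindowsByVariants pos winSize stpSize genSize (getWindowsByVariants pos winSize stpSize genSize)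

-- ===== LEMMAS AND PROOFS =====

-- per-window specification: count of positions in [L, L+winSize) and first such index (0 if none)
def cntSpec (pos : List Int) (winSize L : Int) : Int :=
  (pos.countP (fun p => decide (L ≤ p ∧ p < L + winSize)) : Int)

def fstSpec (pos : List Int) (winSize L : Int) : Int :=
  match pos.findIdx? (fun p => decide (L ≤ p ∧ p < L + winSize)) with
  | some t => (t : Int)
  | none => 0

-- A's inner scan over indices [a, len), characterized against countP/findIdx? of the dropped suffix
theorem aInner_go (pos : List Int) (L E : Int) :
    ∀ (a : Int), 0 ≤ a → ∀ st : Int × Int × Bool,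
    (PySem.List.pyRange a (pos.length : Int) 1).foldl
      (fun st i =>
        let p := PySem.List.pyGetD pos i 0
        if L ≤ p ∧ p < E then
          (st.1 + 1, if st.2.2 then st.2 else (i, true))
        else st) st
    = (st.1 + ((pos.drop a.toNat).countP (fun p => decide (L ≤ p ∧ p < E)) : Int),
       match st.2.2, (pos.drop a.toNat).findIdx? (fun p => decide (L ≤ p ∧ p < E)) with
       | true, _ => st.2
       | false, some t => ((a + t : Int), true)
       | false, none => st.2) := by
  have base : ∀ (a : Int), (pos.length : Int) ≤ a → ∀ st : Int × Int × Bool,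
      (PySem.List.pyRange a (pos.length : Int) 1).foldl
        (fun st i =>
          let p := PySem.List.pyGetD pos i 0
          if L ≤ p ∧ p < E then
            (st.1 + 1, if st.2.2 then st.2 else (i, true))
          else st) st
      = (st.1 + ((pos.drop a.toNat).countP (fun p => decide (L ≤ p ∧ p < E)) : Int),
         match st.2.2, (pos.drop a.toNat).findIdx? (fun p => decide (L ≤ p ∧ p < E)) with
         | true, _ => st.2
         | false, some t => ((a + t : Int), true)
         | false, none => st.2) := by
    intro a hge st
    rw [PySem.List.pyRange_one_eq_nil hge]
    have hdrop : pos.drop a.toNat = [] := by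
      apply List.drop_eq_nil_of_le; omega
    simp [hdrop]
    cases st with
    | mk c rest => cases rest with
      | mk v f => cases f <;> simp
  have main : ∀ (m : Nat) (a : Int), 0 ≤ a → (pos.length : Int) - a ≤ m → ∀ st : Int × Int × Bool,
      (PySem.List.pyRange a (pos.length : Int) 1).foldl
        (fun st i =>
          let p := PySem.List.pyGetD pos i 0
          if L ≤ p ∧ p < E then
            (st.1 + 1, if st.2.2 then st.2 else (i, true))
          else st) st
      = (st.1 + ((pos.drop a.toNat).countP (fun p => decide (L ≤ p ∧ p < E)) : Int),
         match st.2.2, (pos.drop a.toNat).findIdx? (fun p => decide (L ≤ p ∧ p < E)) with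
         | true, _ => st.2
         | false, some t => ((a + t : Int), true)
         | false, none => st.2) := by
    intro m
    induction m with
    | zero =>
      intro a ha hm st
      exact base a (by omega) st
    | succ m ih =>
      intro a ha hm st
      by_cases h : a < (pos.length : Int)
      · rw [PySem.List.pyRange_one_cons h, List.foldl_cons]
        have hlt : a.toNat < pos.length := by omega
        have hget : PySem.List.pyGetD pos a 0 = pos[a.toNat] :=
          PySem.List.pyGetD_eq_getElem pos 0 ha h
        have hdrop : pos.drop a.toNat = pos[a.toNat] :: pos.drop (a.toNat + 1) :=
          List.drop_eq_getElem_cons hlt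
        have ha1 : (a + 1).toNat = a.toNat + 1 := by omega
        rw [ih (a + 1) (by omega) (by omega)]
        rw [hdrop, List.countP_cons, List.findIdx?_cons]
        simp only [hget, ha1]
        by_cases hp : L ≤ pos[a.toNat] ∧ pos[a.toNat] < E
        · have hdp : (decide (L ≤ pos[a.toNat] ∧ pos[a.toNat] < E)) = true := by simp [hp]
          simp only [if_pos hp, hdp, if_true]
          cases st with
          | mk c rest => cases rest with
            | mk v f =>
              cases f <;> simp <;> push_cast <;>
                first | omega | rfl | (constructor <;> first | omega | rfl)
        · have hdp : (decide (L ≤ pos[a.toNat] ∧ pos[a.toNat] < E)) = false := by simp [hp]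
          simp only [if_neg hp, hdp, Bool.false_eq_true]
          cases st with
          | mk c rest => cases rest with
            | mk v f =>
              cases f
              · cases hfi : (pos.drop (a.toNat + 1)).findIdx? (fun p => decide (L ≤ p ∧ p < E)) <;>
                  simp [hfi] <;> push_cast <;> omega
              · simp
      · exact base a (by omega) st
  intro a ha st
  exact main ((pos.length : Int) - a).toNat a ha (by omega) st

theorem bLocs_acc (winSize stpSize genSize : Int) :
    ∀ (m : Nat) (cur : Int), genSize - cur ≤ m → ∀ locs,
      bLocs winSize stpSize genSize cur locs
      = locs ++ bLocs winSize stpSize genSize cur [] := by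
  intro m
  induction m with
  | zero =>
    intro cur hm locs
    have h : ¬ cur < genSize := by omega
    rw [bLocs, bLocs]
    simp [h]
  | succ m ih =>
    intro cur hm locs
    by_cases h : cur < genSize
    · by_cases hbr : cur + winSize > genSize
      · rw [bLocs]; conv_rhs => rw [bLocs]
        simp [h, hbr]
      · by_cases hs : stpSize ≤ 0
        · rw [bLocs]; conv_rhs => rw [bLocs]
          simp [h, hbr, hs]
        · rw [bLocs]; conv_rhs => rw [bLocs]
          simp only [dif_pos h, if_neg hbr, dif_neg hs]
          rw [ih (cur + stpSize) (by omega) (locs ++ [cur]),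
              ih (cur + stpSize) (by omega) ([] ++ [cur])]
          simp
    · rw [bLocs]; conv_rhs => rw [bLocs]
      simp [h]

theorem bLocs_nil (winSize stpSize genSize cur : Int) (h : ¬ cur < genSize) :
    bLocs winSize stpSize genSize cur [] = [] := by
  rw [bLocs]; simp [h]

theorem bLocs_single (winSize stpSize genSize cur : Int) (h : cur < genSize)
    (h2 : cur + winSize > genSize ∨ stpSize ≤ 0) :
    bLocs winSize stpSize genSize cur [] = [cur] := by
  rw [bLocs]
  rcases h2 with h2 | h2
  · simp [h, h2]
  · by_cases hbr : cur + winSize > genSize <;> simp [h, hbr, h2]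

theorem bLocs_cons (winSize stpSize genSize cur : Int) (h : cur < genSize)
    (hbr : ¬ cur + winSize > genSize) (hs : ¬ stpSize ≤ 0) :
    bLocs winSize stpSize genSize cur []
      = cur :: bLocs winSize stpSize genSize (cur + stpSize) [] := by
  rw [bLocs]
  simp only [dif_pos h, if_neg hbr, dif_neg hs]
  rw [bLocs_acc winSize stpSize genSize (genSize - (cur + stpSize)).toNat (cur + stpSize) (by omega)]
  simp

theorem bLocs_pos (winSize stpSize genSize : Int) (hs : 0 < stpSize) :
    ∀ (m : Nat) (cur : Int), genSize - cur ≤ m →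
    ∀ (k : Nat) (hk : k < (bLocs winSize stpSize genSize cur []).length),
      (bLocs winSize stpSize genSize cur [])[k] = cur + k * stpSize := by
  intro m
  induction m with
  | zero =>
    intro cur hm k hk
    rw [bLocs_nil winSize stpSize genSize cur (by omega)] at hk
    simp at hk
  | succ m ih =>
    intro cur hm k hk
    by_cases h : cur < genSize
    · by_cases hbr : cur + winSize > genSize
      · simp only [bLocs_single winSize stpSize genSize cur h (Or.inl hbr)] at hk ⊢
        simp at hk
        subst hk; simp
      · simp only [bLocs_cons winSize stpSize genSize cur h hbr (by omega)] at hk ⊢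
        cases k with
        | zero => simp
        | succ k =>
          simp only [List.length_cons, Nat.succ_lt_succ_iff] at hk
          simp only [List.getElem_cons_succ]
          rw [ih (cur + stpSize) (by omega) k hk]
          push_cast; ring
    · rw [bLocs_nil winSize stpSize genSize cur h] at hk
      simp at hk

theorem bLocs_nonpos (winSize stpSize genSize : Int) (hs : stpSize ≤ 0) :
    bLocs winSize stpSize genSize 1 [] = [] ∨ bLocs winSize stpSize genSize 1 [] = [1] := by
  by_cases h : (1 : Int) < genSize
  · exact Or.inr (bLocs_single winSize stpSize genSize 1 h (Or.inr hs))
  · exact Or.inl (bLocs_nil winSize stpSize genSize 1 h)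
theorem aInner_eq (pos : List Int) (winSize L : Int) :
    aInner pos L (L + winSize)
      = (cntSpec pos winSize L, fstSpec pos winSize L,
         ((pos.findIdx? (fun p => decide (L ≤ p ∧ p < L + winSize))).isSome : Bool)) := by
  unfold aInner
  rw [aInner_go pos L (L + winSize) 0 le_rfl (0, 0, false)]
  simp only [Int.toNat_zero, List.drop_zero]
  cases hfi : pos.findIdx? (fun p => decide (L ≤ p ∧ p < L + winSize)) <;>
    simp [cntSpec, fstSpec, ← Bool.decide_and, hfi]

theorem aLoop_eq (pos : List Int) (winSize stpSize genSize : Int) :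
    ∀ (m : Nat) (cur : Int), genSize - cur ≤ m → ∀ ws vs,
      aLoop pos winSize stpSize genSize cur ws vs
      = (ws ++ (bLocs winSize stpSize genSize cur []).map (fstSpec pos winSize),
         vs ++ (bLocs winSize stpSize genSize cur []).map (cntSpec pos winSize)) := by
  intro m
  induction m with
  | zero =>
    intro cur hm ws vs
    have h : ¬ cur < genSize := by omega
    rw [aLoop, bLocs_nil winSize stpSize genSize cur h]
    simp [h]
  | succ m ih =>
    intro cur hm ws vs
    by_cases h : cur < genSize
    · by_cases hbr : cur + winSize > genSize
      · rw [aLoop, bLocs_single winSize stpSize genSize cur h (Or.inl hbr)]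
        simp [h, hbr, aInner_eq]
      · by_cases hs : stpSize ≤ 0
        · rw [aLoop, bLocs_single winSize stpSize genSize cur h (Or.inr hs)]
          simp [h, hbr, hs, aInner_eq]
        · rw [aLoop, bLocs_cons winSize stpSize genSize cur h hbr hs]
          simp only [dif_pos h, if_neg hbr, dif_neg hs]
          rw [ih (cur + stpSize) (by omega)]
          simp [aInner_eq]
    · rw [aLoop, bLocs_nil winSize stpSize genSize cur h]
      simp [h]

theorem paint_spec (i kh : Int) :
    ∀ (m : Nat) (kl : Int), 0 ≤ kl → kh + 1 - kl ≤ m → ∀ cs fs : List Int,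
      kh < (cs.length : Int) → kh < (fs.length : Int) →
      (paint i kl kh (cs, fs)).1.length = cs.length ∧
      (paint i kl kh (cs, fs)).2.length = fs.length ∧
      ∀ k : Nat,
        (paint i kl kh (cs, fs)).1[k]? =
          (if kl ≤ (k : Int) ∧ (k : Int) ≤ kh then (cs[k]?).map (fun x => x + 1) else cs[k]?) ∧
        (paint i kl kh (cs, fs)).2[k]? =
          (if kl ≤ (k : Int) ∧ (k : Int) ≤ kh then (fs[k]?).map (fun _ => i) else fs[k]?) := by
  intro m
  induction m with
  | zero =>
    intro kl hkl hm cs fs hc hf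
    rw [paint, PySem.List.pyRange_one_eq_nil (by omega)]
    refine ⟨rfl, rfl, fun k => ⟨?_, ?_⟩⟩ <;> rw [if_neg (by omega)] <;> rfl
  | succ m ih =>
    intro kl hkl hm cs fs hc hf
    by_cases hle : kh + 1 ≤ kl
    · rw [paint, PySem.List.pyRange_one_eq_nil (by omega)]
      refine ⟨rfl, rfl, fun k => ⟨?_, ?_⟩⟩ <;> rw [if_neg (by omega)] <;> rfl
    · have hklt : kl.toNat < cs.length := by omega
      have hklf : kl.toNat < fs.length := by omega
      rw [paint, PySem.List.pyRange_one_cons (by omega), List.foldl_cons]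
      have hstep : (List.foldl
          (fun st k =>
            (PySem.List.pySetD st.1 k (PySem.List.pyGetD st.1 k 0 + 1),
             PySem.List.pySetD st.2 k i))
          (PySem.List.pySetD cs kl (PySem.List.pyGetD cs kl 0 + 1), PySem.List.pySetD fs kl i)
          (PySem.List.pyRange (kl + 1) (kh + 1) 1))
          = paint i (kl + 1) kh
              (PySem.List.pySetD cs kl (PySem.List.pyGetD cs kl 0 + 1), PySem.List.pySetD fs kl i) := rfl
      rw [hstep]
      set cs' := PySem.List.pySetD cs kl (PySem.List.pyGetD cs kl 0 + 1) with hcs'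
      set fs' := PySem.List.pySetD fs kl i with hfs'
      have hlc : cs'.length = cs.length := PySem.List.length_pySetD cs kl _
      have hlf : fs'.length = fs.length := PySem.List.length_pySetD fs kl i
      obtain ⟨h1, h2, h3⟩ := ih (kl + 1) (by omega) (by omega) cs' fs' (by omega) (by omega)
      refine ⟨by rw [h1, hlc], by rw [h2, hlf], fun k => ?_⟩
      obtain ⟨h4, h5⟩ := h3 k
      have hset_c : cs' = cs.set kl.toNat (cs[kl.toNat] + 1) := by
        rw [hcs', PySem.List.pySetD_of_nonneg cs _ hkl,
            PySem.List.pyGetD_eq_getElem cs 0 hkl (by omega)]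
      have hset_f : fs' = fs.set kl.toNat i := PySem.List.pySetD_of_nonneg fs i hkl
      by_cases hkk : (k : Int) = kl
      · have hknat : k = kl.toNat := by omega
        constructor
        · rw [h4, if_neg (by omega), hset_c, hknat, List.getElem?_set_self hklt,
              if_pos (by omega), List.getElem?_eq_getElem hklt]
          simp
        · rw [h5, if_neg (by omega), hset_f, hknat, List.getElem?_set_self hklf,
              if_pos (by omega), List.getElem?_eq_getElem hklf]
          simp
      · have hne : kl.toNat ≠ k := by omega
        have hc' : cs'[k]? = cs[k]? := by rw [hset_c, List.getElem?_set_ne hne]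
        have hf' : fs'[k]? = fs[k]? := by rw [hset_f, List.getElem?_set_ne hne]
        constructor
        · rw [h4, hc']
          by_cases hin : kl + 1 ≤ (k : Int) ∧ (k : Int) ≤ kh
          · rw [if_pos hin, if_pos (by omega)]
          · rw [if_neg hin, if_neg (by omega)]
        · rw [h5, hf']
          by_cases hin : kl + 1 ≤ (k : Int) ∧ (k : Int) ≤ kh
          · rw [if_pos hin, if_pos (by omega)]
          · rw [if_neg hin, if_neg (by omega)]

theorem cover_iff (winSize stpSize genSize p : Int) (locs : List Int)
    (hlocs : locs = bLocs winSize stpSize genSize 1 []) (k : Nat) (hk : k < locs.length) :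
    ((bRange winSize stpSize (locs.length : Int) p).1 ≤ (k : Int) ∧
      (k : Int) ≤ (bRange winSize stpSize (locs.length : Int) p).2)
    ↔ (locs[k] ≤ p ∧ p < locs[k] + winSize) := by
  by_cases hs : 0 < stpSize
  · have hL : locs[k] = 1 + (k : Int) * stpSize := by
      subst hlocs
      exact bLocs_pos winSize stpSize genSize hs (genSize - 1).toNat 1 (by omega) k hk
    have h1 : PySem.Int.floordiv (p - 1 - winSize) stpSize + 1 ≤ (k : Int)
        ↔ p < 1 + (k : Int) * stpSize + winSize := by
      have hlt := PySem.Int.floordiv_lt_iff_lt_mul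
        (a := p - 1 - winSize) (b := stpSize) (q := (k : Int)) hs
      omega
    have h2 : (k : Int) ≤ PySem.Int.floordiv (p - 1) stpSize
        ↔ 1 + (k : Int) * stpSize ≤ p := by
      have hle := PySem.Int.le_floordiv_iff_mul_le
        (a := p - 1) (b := stpSize) (q := (k : Int)) hs
      omega
    have hkw : (k : Int) ≤ (locs.length : Int) - 1 := by omega
    unfold bRange
    simp only [if_pos hs, hL]
    split_ifs <;> omega
  · rcases bLocs_nonpos winSize stpSize genSize (by omega) with h | h
    · rw [← hlocs] at h
      subst h; simp at hk
    · rw [← hlocs] at h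
      have hk1 : k = 0 := by
        have := hk
        rw [h] at this
        simpa using this
      subst hk1
      have hL : locs[0] = 1 := by simp [h]
      have hw : (locs.length : Int) = 1 := by rw [h]; rfl
      unfold bRange
      simp only [if_neg hs, hL, hw]
      by_cases hp : 1 ≤ p ∧ p < 1 + winSize
      · simp only [if_pos hp]
        constructor
        · intro _; exact hp
        · intro _; constructor <;> omega
      · simp only [if_neg hp]
        constructor
        · intro hcon
          exfalso
          rcases hcon with ⟨h1, h2⟩
          split at h2 <;> omega
        · intro hcon; exact absurd hcon hp

theorem bRange_bounds (winSize stpSize w p : Int) :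
    0 ≤ (bRange winSize stpSize w p).1 ∧ (bRange winSize stpSize w p).2 ≤ w - 1 := by
  unfold bRange
  split_ifs <;> simp <;> omega

theorem bFold_spec (pos : List Int) (winSize stpSize genSize : Int) (locs : List Int)
    (hlocs : locs = bLocs winSize stpSize genSize 1 []) :
    ∀ (m : Nat) (a : Int), 0 ≤ a → (pos.length : Int) - a ≤ m →
      ((PySem.List.pyRange a (pos.length : Int) 1).foldr
          (fun j st => bStep pos winSize stpSize (locs.length : Int) st j)
          (List.replicate locs.length 0, List.replicate locs.length 0)).1.length = locs.length ∧
      ((PySem.List.pyRange a (pos.length : Int) 1).foldr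
          (fun j st => bStep pos winSize stpSize (locs.length : Int) st j)
          (List.replicate locs.length 0, List.replicate locs.length 0)).2.length = locs.length ∧
      ∀ (k : Nat) (hk : k < locs.length),
        ((PySem.List.pyRange a (pos.length : Int) 1).foldr
            (fun j st => bStep pos winSize stpSize (locs.length : Int) st j)
            (List.replicate locs.length 0, List.replicate locs.length 0)).1[k]? =
          some (((pos.drop a.toNat).countP
              (fun p => decide (locs[k] ≤ p ∧ p < locs[k] + winSize)) : Int)) ∧
        ((PySem.List.pyRange a (pos.length : Int) 1).foldr
            (fun j st => bStep pos winSize stpSize (locs.length : Int) st j)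
            (List.replicate locs.length 0, List.replicate locs.length 0)).2[k]? =
          some (match (pos.drop a.toNat).findIdx?
                  (fun p => decide (locs[k] ≤ p ∧ p < locs[k] + winSize)) with
                | some t => (a + t : Int)
                | none => 0) := by
  intro m
  induction m with
  | zero =>
    intro a ha hm
    rw [PySem.List.pyRange_one_eq_nil (by omega)]
    have hdrop : pos.drop a.toNat = [] := by apply List.drop_eq_nil_of_le; omega
    refine ⟨by simp, by simp, fun k hk => ?_⟩
    rw [hdrop]
    simp [List.getElem?_replicate, hk]
  | succ m ih =>
    intro a ha hm
    by_cases h : a < (pos.length : Int)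
    · rw [PySem.List.pyRange_one_cons h, List.foldr_cons]
      obtain ⟨ih1, ih2, ih3⟩ := ih (a + 1) (by omega) (by omega)
      set st := (PySem.List.pyRange (a + 1) (pos.length : Int) 1).foldr
          (fun j st => bStep pos winSize stpSize (locs.length : Int) st j)
          (List.replicate locs.length 0, List.replicate locs.length 0) with hst
      have hlt : a.toNat < pos.length := by omega
      have hget : PySem.List.pyGetD pos a 0 = pos[a.toNat] :=
        PySem.List.pyGetD_eq_getElem pos 0 ha h
      have hdrop : pos.drop a.toNat = pos[a.toNat] :: pos.drop (a.toNat + 1) :=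
        List.drop_eq_getElem_cons hlt
      have ha1 : (a + 1).toNat = a.toNat + 1 := by omega
      obtain ⟨hb1, hb2⟩ := bRange_bounds winSize stpSize (locs.length : Int) pos[a.toNat]
      obtain ⟨p1, p2, p3⟩ := paint_spec a (bRange winSize stpSize (locs.length : Int) pos[a.toNat]).2
        ((bRange winSize stpSize (locs.length : Int) pos[a.toNat]).2 + 1
          - (bRange winSize stpSize (locs.length : Int) pos[a.toNat]).1).toNat
        (bRange winSize stpSize (locs.length : Int) pos[a.toNat]).1 hb1 (by omega)
        st.1 st.2 (by rw [ih1]; omega) (by rw [ih2]; omega)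
      have hbstep : bStep pos winSize stpSize (locs.length : Int) st a
          = paint a (bRange winSize stpSize (locs.length : Int) pos[a.toNat]).1
              (bRange winSize stpSize (locs.length : Int) pos[a.toNat]).2 (st.1, st.2) := by
        rw [bStep, hget, Prod.mk.eta]
      have hcovgen := cover_iff winSize stpSize genSize pos[a.toNat] locs hlocs
      refine ⟨?_, ?_, fun k hk => ?_⟩
      · rw [hbstep, p1, ih1]
      · rw [hbstep, p2, ih2]
      · obtain ⟨q1, q2⟩ := p3 k
        obtain ⟨w1, w2⟩ := ih3 k hk
        have hcov := hcovgen k hk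
        rw [hbstep, hdrop, List.countP_cons, List.findIdx?_cons]
        constructor
        · rw [q1, w1]
          by_cases hcv : locs[k] ≤ pos[a.toNat] ∧ pos[a.toNat] < locs[k] + winSize
          · rw [if_pos (hcov.mpr hcv)]
            have hd : (decide (locs[k] ≤ pos[a.toNat] ∧ pos[a.toNat] < locs[k] + winSize)) = true := by
              simp [hcv]
            rw [hd]
            simp only [Option.map_some]
            rw [ha1]
            push_cast
            ring_nf
          · rw [if_neg (fun hc => hcv (hcov.mp hc))]
            have hd : (decide (locs[k] ≤ pos[a.toNat] ∧ pos[a.toNat] < locs[k] + winSize)) = false := by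
              simp [hcv]
            rw [hd]
            rw [ha1]
            simp
        · rw [q2, w2]
          by_cases hcv : locs[k] ≤ pos[a.toNat] ∧ pos[a.toNat] < locs[k] + winSize
          · rw [if_pos (hcov.mpr hcv)]
            have hd : (decide (locs[k] ≤ pos[a.toNat] ∧ pos[a.toNat] < locs[k] + winSize)) = true := by
              simp [hcv]
            rw [hd]
            simp
          · rw [if_neg (fun hc => hcv (hcov.mp hc))]
            have hd : (decide (locs[k] ≤ pos[a.toNat] ∧ pos[a.toNat] < locs[k] + winSize)) = false := by
              simp [hcv]
            rw [hd, ha1]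
            cases hfi : (pos.drop (a.toNat + 1)).findIdx?
                (fun q => decide (locs[k] ≤ q ∧ q < locs[k] + winSize)) <;>
              simp [hfi] <;> push_cast <;> ring_nf
    · rw [PySem.List.pyRange_one_eq_nil (by omega)]
      have hdrop : pos.drop a.toNat = [] := by apply List.drop_eq_nil_of_le; omega
      refine ⟨by simp, by simp, fun k hk => ?_⟩
      rw [hdrop]
      simp [List.getElem?_replicate, hk]

-- ===== VERDICT (by name: the statement is the Claim_ definition above) =====
theorem getWindowsByVariants_spec : Claim_equal_getWindowsByVariants := by
  intro pos winSize stpSize genSize _hdom _hpre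
  unfold Spec_getWindowsByVariants getWindowsByVariants getWindowsByVariants_alt
  dsimp only
  rw [aLoop_eq pos winSize stpSize genSize (genSize - 1).toNat 1 (by omega) [] []]
  rw [List.foldl_reverse]
  dsimp only
  simp only [List.nil_append]
  obtain ⟨h1, h2, h3⟩ := bFold_spec pos winSize stpSize genSize
    (bLocs winSize stpSize genSize 1 []) rfl pos.length 0 le_rfl (by omega)
  congr 1
  · apply List.ext_getElem?
    intro k
    by_cases hk : k < (bLocs winSize stpSize genSize 1 []).length
    · rw [(h3 k hk).2]
      simp only [List.nil_append, List.getElem?_map, List.getElem?_eq_getElem hk,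
        Option.map_some, Int.toNat_zero, List.drop_zero, fstSpec]
      cases hfi : pos.findIdx? (fun p => decide ((bLocs winSize stpSize genSize 1 [])[k] ≤ p ∧
          p < (bLocs winSize stpSize genSize 1 [])[k] + winSize)) <;>
        simp [hfi]
    · rw [List.getElem?_eq_none (l := (List.map (fstSpec pos winSize) (bLocs winSize stpSize genSize 1 []))) (by simp; omega)]
      rw [List.getElem?_eq_none (by rw [h2]; omega)]
  congr 1
  apply List.ext_getElem?
  intro k
  by_cases hk : k < (bLocs winSize stpSize genSize 1 []).length
  · rw [(h3 k hk).1]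
    simp only [List.nil_append, List.getElem?_map, List.getElem?_eq_getElem hk,
      Option.map_some, Int.toNat_zero, List.drop_zero, cntSpec]
  · rw [List.getElem?_eq_none (l := (List.map (cntSpec pos winSize) (bLocs winSize stpSize genSize 1 []))) (by simp; omega)]
    rw [List.getElem?_eq_none (by rw [h1]; omega)]
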